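-- pv_equiv track=rewrite | github.com/bbookng/Programmers | kakao/택배 배달과 수거하기.py | solution
-- ===== SOURCE A (Python) =====
-- def solution(cap, n, deliveries, pickups):
--     answer = 0
--     deliver, pickup = 0, 0
--     for i in range(n):
--         deliver += deliveries[n-i-1]
--         pickup += pickups[n-i-1]
--
--         # cap 이 가용량이 있을 때 까지 (0, 0 이어야 cap 이 full)
--         # 배달할 게 있거나, 픽업할 게 있을 때 까지.
--         while deliver > 0 or pickup > 0:
--             deliver -= cap
--             pickup -= cap
--             answer += (n-i) * 2
--
--     return answer
-- ===== SOURCE B (Python) =====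
-- def solution(cap, n, deliveries, pickups):
--     answer = 0
--     d = p = 0
--     for dist in range(n, 0, -1):
--         d += deliveries[dist - 1]
--         p += pickups[dist - 1]
--         trips = max(0, -(-d // cap), -(-p // cap))
--         answer += 2 * dist * trips
--         d -= trips * cap
--         p -= trips * cap
--     return answer
-- ===== Notes on version B (the rewrite author's own statement) =====
-- stated objective: alternative
-- what changed: The inner while loop that subtracts cap once per trip is replaced by a ceiling-division closed form for the number of trips per house, keeping the running carryover; one arithmetic step per house instead of one per trip.
-- outside the precondition, e.g. on solution(0, 1, [0], [0]): A returns 0, B raises ZeroDivisionError; on solution(-1, 1, [-2], [-2]): A returns 0, B returns 4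
import Mathlib
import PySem

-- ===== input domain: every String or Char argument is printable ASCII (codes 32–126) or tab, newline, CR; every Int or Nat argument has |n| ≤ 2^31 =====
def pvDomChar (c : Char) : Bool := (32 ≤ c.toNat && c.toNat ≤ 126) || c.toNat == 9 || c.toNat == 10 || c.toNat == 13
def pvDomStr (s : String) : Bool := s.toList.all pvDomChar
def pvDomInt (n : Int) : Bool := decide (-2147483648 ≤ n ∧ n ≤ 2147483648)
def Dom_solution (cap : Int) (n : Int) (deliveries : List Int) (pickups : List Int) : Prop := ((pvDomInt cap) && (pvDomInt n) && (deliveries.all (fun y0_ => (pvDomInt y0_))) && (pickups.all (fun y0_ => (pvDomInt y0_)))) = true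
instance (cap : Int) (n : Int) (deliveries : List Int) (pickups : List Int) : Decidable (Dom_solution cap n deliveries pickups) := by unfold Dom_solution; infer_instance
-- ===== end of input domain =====

-- B replaces A's per-trip inner while loop by a ceiling-division closed form per house (alternative algorithm).

-- ===== PORT A =====
-- inner 'while deliver > 0 or pickup > 0' loop; the fuel argument only makes the
-- recursion structurally total — under Pre_ (1 ≤ cap) the supplied fuel is never exhausted
def solInner (cap w : Int) : Nat → Int → Int → Int → Int × Int × Int
  | 0, d, p, a => (d, p, a)
  | fuel + 1, d, p, a =>
    if d > 0 ∨ p > 0 then solInner cap w fuel (d - cap) (p - cap) (a + w * 2)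
    else (d, p, a)

def solution (cap : Int) (n : Int) (deliveries : List Int) (pickups : List Int) : Int :=
  let s := (PySem.List.pyRange 0 n 1).foldl
    (fun (st : Int × Int × Int) i =>
      let d := st.1 + PySem.List.pyGetD deliveries (n - i - 1) 0
      let p := st.2.1 + PySem.List.pyGetD pickups (n - i - 1) 0
      solInner cap (n - i) (d.toNat + p.toNat) d p st.2.2)
    (0, 0, 0)
  s.2.2

-- ===== PORT B =====
def solution_alt (cap : Int) (n : Int) (deliveries : List Int) (pickups : List Int) : Int :=
  let s := (PySem.List.pyRange n 0 (-1)).foldl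
    (fun (st : Int × Int × Int) dist =>
      let d := st.1 + PySem.List.pyGetD deliveries (dist - 1) 0
      let p := st.2.1 + PySem.List.pyGetD pickups (dist - 1) 0
      let trips := max 0 (max (-(PySem.Int.floordiv (-d) cap)) (-(PySem.Int.floordiv (-p) cap)))
      (d - trips * cap, p - trips * cap, st.2.2 + 2 * dist * trips))
    (0, 0, 0)
  s.2.2

-- ===== PRECONDITION & SPEC =====
-- Pre_ excludes cap ≤ 0 when n > 0 (A's while loop never terminates once any suffix load is
-- positive, and B divides by cap) and lists shorter than n (A raises IndexError).
def Pre_solution (cap : Int) (n : Int) (deliveries : List Int) (pickups : List Int) : Prop :=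
  (1 ≤ cap ∨ n ≤ 0) ∧ n ≤ (deliveries.length : Int) ∧ n ≤ (pickups.length : Int)
instance (cap : Int) (n : Int) (deliveries : List Int) (pickups : List Int) : Decidable (Pre_solution cap n deliveries pickups) := by unfold Pre_solution; infer_instance

def pvWitness_solution : Int × Int × List Int × List Int := (4, 2, [3, 5], [2, 0])

def Spec_solution (cap : Int) (n : Int) (deliveries : List Int) (pickups : List Int) (out : Int) : Prop := out = solution_alt cap n deliveries pickups
instance (cap : Int) (n : Int) (deliveries : List Int) (pickups : List Int) (out : Int) : Decidable (Spec_solution cap n deliveries pickups out) := by unfold Spec_solution; infer_instance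

-- ===== CLAIM (what is proved, stated in full; the proofs are below) =====
def Claim_equal_solution : Prop := ∀ (cap : Int) (n : Int) (deliveries : List Int) (pickups : List Int), Dom_solution cap n deliveries pickups → Pre_solution cap n deliveries pickups → Spec_solution cap n deliveries pickups (solution cap n deliveries pickups)

-- ===== LEMMAS AND PROOFS =====

-- B's trip count for carried loads d, p
def tc (cap d p : Int) : Int :=
  max 0 (max (-(PySem.Int.floordiv (-d) cap)) (-(PySem.Int.floordiv (-p) cap)))

lemma tc_nonpos (cap d p : Int) (hcap : 1 ≤ cap) (hd : d ≤ 0) (hp : p ≤ 0) :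
    tc cap d p = 0 := by
  unfold tc
  simp only [PySem.Int.floordiv_eq_ediv_of_pos (show (0:Int) < cap by omega)]
  have h1 : 0 ≤ (-d) / cap := Int.ediv_nonneg (by omega) (by omega)
  have h2 : 0 ≤ (-p) / cap := Int.ediv_nonneg (by omega) (by omega)
  omega

lemma tc_pos (cap d p : Int) (hcap : 1 ≤ cap) (h : d > 0 ∨ p > 0) :
    1 ≤ tc cap d p := by
  unfold tc
  simp only [PySem.Int.floordiv_eq_ediv_of_pos (show (0:Int) < cap by omega)]
  rcases h with h | h
  · have : (-d) / cap < 0 := Int.ediv_neg_of_neg_of_pos (by omega) (by omega)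
    omega
  · have : (-p) / cap < 0 := Int.ediv_neg_of_neg_of_pos (by omega) (by omega)
    omega

lemma tc_step (cap d p : Int) (hcap : 1 ≤ cap) (h : d > 0 ∨ p > 0) :
    tc cap (d - cap) (p - cap) = tc cap d p - 1 := by
  have hpos := tc_pos cap d p hcap h
  unfold tc at *
  simp only [PySem.Int.floordiv_eq_ediv_of_pos (show (0:Int) < cap by omega)] at *
  have hd : (-(d - cap)) = -d + 1 * cap := by ring
  have hp : (-(p - cap)) = -p + 1 * cap := by ring
  rw [hd, hp, Int.add_mul_ediv_right _ _ (by omega : cap ≠ 0),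
      Int.add_mul_ediv_right _ _ (by omega : cap ≠ 0)]
  omega

lemma solInner_eq (cap w : Int) (hcap : 1 ≤ cap) :
    ∀ (fuel : Nat) (d p a : Int), d.toNat + p.toNat ≤ fuel →
      solInner cap w fuel d p a =
        (d - tc cap d p * cap, p - tc cap d p * cap, a + w * 2 * tc cap d p) := by
  intro fuel
  induction fuel with
  | zero =>
    intro d p a hf
    have hd : d ≤ 0 := by omega
    have hp : p ≤ 0 := by omega
    simp [solInner, tc_nonpos cap d p hcap hd hp]
  | succ fuel ih =>
    intro d p a hf
    by_cases h : d > 0 ∨ p > 0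
    · have hfuel : (d - cap).toNat + (p - cap).toNat ≤ fuel := by omega
      have hrec := ih (d - cap) (p - cap) (a + w * 2) hfuel
      rw [solInner, if_pos h, hrec, tc_step cap d p hcap h]
      refine Prod.ext (by ring) (Prod.ext (by ring) (by ring))
    · rw [not_or] at h; simp only [not_lt] at h
      simp [solInner, h.1, h.2, tc_nonpos cap d p hcap h.1 h.2]

lemma step_eq (cap n : Int) (deliveries pickups : List Int) (hcap : 1 ≤ cap)
    (st : Int × Int × Int) (i : Int) :
    solInner cap (n - i)
      ((st.1 + PySem.List.pyGetD deliveries (n - i - 1) 0).toNat +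
        (st.2.1 + PySem.List.pyGetD pickups (n - i - 1) 0).toNat)
      (st.1 + PySem.List.pyGetD deliveries (n - i - 1) 0)
      (st.2.1 + PySem.List.pyGetD pickups (n - i - 1) 0) st.2.2 =
    (st.1 + PySem.List.pyGetD deliveries ((n - i) - 1) 0 -
        tc cap (st.1 + PySem.List.pyGetD deliveries ((n - i) - 1) 0)
          (st.2.1 + PySem.List.pyGetD pickups ((n - i) - 1) 0) * cap,
      st.2.1 + PySem.List.pyGetD pickups ((n - i) - 1) 0 -
        tc cap (st.1 + PySem.List.pyGetD deliveries ((n - i) - 1) 0)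
          (st.2.1 + PySem.List.pyGetD pickups ((n - i) - 1) 0) * cap,
      st.2.2 + 2 * (n - i) *
        tc cap (st.1 + PySem.List.pyGetD deliveries ((n - i) - 1) 0)
          (st.2.1 + PySem.List.pyGetD pickups ((n - i) - 1) 0)) := by
  rw [solInner_eq cap (n - i) hcap _ _ _ _ (le_refl _)]
  refine Prod.ext rfl (Prod.ext rfl ?_)
  simp only []
  ring

lemma ranges_eq (n : Int) :
    PySem.List.pyRange n 0 (-1) = (PySem.List.pyRange 0 n 1).map (fun i => n - i) := by
  rw [PySem.List.pyRange_neg_one, PySem.List.pyRange_one]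
  simp [List.map_map, Function.comp]

-- ===== VERDICT (by name: the statement is the Claim_ definition above) =====
theorem solution_spec : Claim_equal_solution := by
  intro cap n deliveries pickups _hdom hpre
  obtain ⟨hcap | hn, -, -⟩ := hpre
  case inr =>
    show solution cap n deliveries pickups = solution_alt cap n deliveries pickups
    unfold solution solution_alt
    rw [PySem.List.pyRange_one_eq_nil hn, PySem.List.pyRange_neg_one_eq_nil hn]
    rfl
  show solution cap n deliveries pickups = solution_alt cap n deliveries pickups
  unfold solution solution_alt
  rw [ranges_eq n, List.foldl_map]
  have hfun :
      (fun (st : Int × Int × Int) (i : Int) =>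
        let d := st.1 + PySem.List.pyGetD deliveries (n - i - 1) 0
        let p := st.2.1 + PySem.List.pyGetD pickups (n - i - 1) 0
        solInner cap (n - i) (d.toNat + p.toNat) d p st.2.2) =
      (fun (st : Int × Int × Int) (i : Int) =>
        let d := st.1 + PySem.List.pyGetD deliveries ((n - i) - 1) 0
        let p := st.2.1 + PySem.List.pyGetD pickups ((n - i) - 1) 0
        let trips := max 0 (max (-(PySem.Int.floordiv (-d) cap)) (-(PySem.Int.floordiv (-p) cap)))
        (d - trips * cap, p - trips * cap, st.2.2 + 2 * (n - i) * trips)) := by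
    funext st i
    exact step_eq cap n deliveries pickups hcap st i
  rw [hfun]
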